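-- pv_equiv track=rewrite | github.com/withNoclout/LeetCode-Med | quiz_minimumpush.py | minimumPushes
-- ===== SOURCE A (Python) =====
-- def minimumPushes(word):
--     import collections
--     counts = collections.Counter(word)
--     freqs = sorted(counts.values(), reverse=True)
--
--     res = 0
--     for i, f in enumerate(freqs):
--         res += f * (i // 8 + 1)
--
--     return res
-- ===== SOURCE B (Python) =====
-- def minimumPushes(word):
--     import collections
--     freqs = sorted(collections.Counter(word).values(), reverse=True)
--     res = 0
--     while freqs:
--         res += sum(freqs)
--         freqs = freqs[8:]
--     return res
-- ===== Notes on version B (the rewrite author's own statement) =====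
-- stated objective: alternative
-- what changed: Replaces the enumerate loop with per-index weights i//8+1 by a suffix-sum loop: repeatedly add the sum of the remaining frequencies and drop the 8 cheapest-key letters, so each extra key group contributes one more pass over its suffix.
import Mathlib
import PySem

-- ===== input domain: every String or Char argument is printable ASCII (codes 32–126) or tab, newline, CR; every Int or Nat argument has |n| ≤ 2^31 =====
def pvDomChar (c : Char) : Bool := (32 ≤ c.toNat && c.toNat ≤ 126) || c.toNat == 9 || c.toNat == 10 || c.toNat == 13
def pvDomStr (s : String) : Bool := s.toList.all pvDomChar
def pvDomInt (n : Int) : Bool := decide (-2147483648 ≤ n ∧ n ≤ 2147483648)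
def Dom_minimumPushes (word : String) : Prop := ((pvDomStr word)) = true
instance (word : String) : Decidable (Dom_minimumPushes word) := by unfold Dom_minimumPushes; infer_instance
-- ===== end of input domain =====

-- B replaces the per-index weighted sum (weight i//8+1) by a suffix-sum loop over blocks of 8
-- (same asymptotic cost; a different decomposition of the same total).

-- ===== PORT A =====
-- freqs = sorted(Counter(word).values(), reverse=True); res = sum over enumerate of f*(i//8+1)
def minimumPushes (word : String) : Int :=
  let counts := PySem.Dict.counter word.toList
  let freqs := PySem.List.sorted counts.values (fun x => x) true
  (PySem.List.enumerate freqs).foldl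
    (fun res p => res + p.2 * (PySem.Int.floordiv p.1 8 + 1)) 0

-- ===== PORT B =====
-- while freqs: res += sum(freqs); freqs = freqs[8:]
def altLoop (freqs : List Int) (res : Int) : Int :=
  match freqs with
  | [] => res
  | x :: t => altLoop ((x :: t).drop 8) (res + (x :: t).sum)
termination_by freqs.length
decreasing_by simp [List.length_drop]

def minimumPushes_alt (word : String) : Int :=
  let freqs := PySem.List.sorted (PySem.Dict.counter word.toList).values (fun x => x) true
  altLoop freqs 0

-- ===== PRECONDITION & SPEC =====
def Spec_minimumPushes (word : String) (out : Int) : Prop := out = minimumPushes_alt word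
instance (word : String) (out : Int) : Decidable (Spec_minimumPushes word out) := by unfold Spec_minimumPushes; infer_instance

-- ===== CLAIM (what is proved, stated in full; the proofs are below) =====
def Claim_equal_minimumPushes : Prop := ∀ (word : String), Dom_minimumPushes word → Spec_minimumPushes word (minimumPushes word)

-- ===== LEMMAS AND PROOFS =====

/-- the common closed form: sum of l[i] * (i/8 + 1) -/
def wsum (l : List Int) : Int :=
  ∑ i ∈ Finset.range l.length, l.getD i 0 * (((i / 8 : Nat) : Int) + 1)

theorem sum_eq_sum_getD (l : List Int) :
    l.sum = ∑ i ∈ Finset.range l.length, l.getD i 0 := by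
  induction l with
  | nil => simp
  | cons a t ih =>
    simp only [List.sum_cons, List.length_cons, Finset.sum_range_succ',
      List.getD_cons_succ, List.getD_cons_zero, ih]
    ring

theorem enumFold_eq_wsum' (l : List Int) (s : Nat) (r : Int) :
    (PySem.List.enumerate l (s : Int)).foldl
      (fun res p => res + p.2 * (PySem.Int.floordiv p.1 8 + 1)) r
    = r + ∑ i ∈ Finset.range l.length, l.getD i 0 * ((((s + i) / 8 : Nat) : Int) + 1) := by
  induction l generalizing s r with
  | nil => simp [PySem.List.enumerate_nil]
  | cons a t ih =>
    rw [PySem.List.enumerate_cons]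
    simp only [List.foldl_cons]
    rw [show ((s : Int) + 1) = ((s + 1 : Nat) : Int) by push_cast; ring, ih]
    simp only [List.length_cons, Finset.sum_range_succ', List.getD_cons_succ,
      List.getD_cons_zero]
    rw [show PySem.Int.floordiv (s : Int) 8 = ((s / 8 : Nat) : Int) from by
      exact_mod_cast PySem.Int.floordiv_natCast s 8]
    have hss : ∑ i ∈ Finset.range t.length, t.getD i 0 * ((((s + 1 + i) / 8 : Nat) : Int) + 1)
        = ∑ i ∈ Finset.range t.length, t.getD i 0 * ((((s + (i + 1)) / 8 : Nat) : Int) + 1) := by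
      apply Finset.sum_congr rfl
      intro i _
      congr 3
      omega
    rw [hss]
    simp only [Nat.add_zero]
    ring

theorem wsum_cons_drop (l : List Int) :
    wsum l = l.sum + wsum (l.drop 8) := by
  unfold wsum
  have hgetD : ∀ i : Nat, (l.drop 8).getD i 0 = l.getD (8 + i) 0 := by
    intro i
    rcases Nat.lt_or_ge (8 + i) l.length with hlt | hge
    · rw [List.getD_eq_getElem _ _ (by simp; omega), List.getD_eq_getElem _ _ hlt]
      simp [List.getElem_drop]
    · rw [List.getD_eq_default _ _ (by simp; omega), List.getD_eq_default _ _ hge]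
  rw [sum_eq_sum_getD]
  have hsplit : ∑ i ∈ Finset.range l.length, l.getD i 0 * (((i / 8 : Nat) : Int) + 1)
      = (∑ i ∈ Finset.range l.length, l.getD i 0)
        + ∑ i ∈ Finset.range l.length, l.getD i 0 * ((i / 8 : Nat) : Int) := by
    rw [← Finset.sum_add_distrib]
    apply Finset.sum_congr rfl
    intro i _
    ring
  rw [hsplit]
  congr 1
  simp only [hgetD, List.length_drop]
  rcases Nat.lt_or_ge l.length 8 with hn | hn
  · have hz : l.length - 8 = 0 := by omega
    rw [hz]
    simp only [Finset.range_zero, Finset.sum_empty]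
    apply Finset.sum_eq_zero
    intro i hi
    rw [Finset.mem_range] at hi
    have h8 : i / 8 = 0 := by omega
    rw [h8]
    simp
  · rw [Finset.range_eq_Ico, ← Finset.sum_Ico_consecutive _ (Nat.zero_le 8) hn]
    have h8 : ∑ i ∈ Finset.Ico 0 8, l.getD i 0 * ((i / 8 : Nat) : Int) = 0 := by
      apply Finset.sum_eq_zero
      intro i hi
      rw [Finset.mem_Ico] at hi
      have hz : i / 8 = 0 := by omega
      rw [hz]
      simp
    rw [h8, zero_add, Finset.sum_Ico_eq_sum_range, ← Finset.range_eq_Ico]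
    apply Finset.sum_congr rfl
    intro j _
    have hq : (8 + j) / 8 = j / 8 + 1 := by omega
    rw [hq]
    push_cast
    ring

theorem altLoop_eq_wsum (l : List Int) (r : Int) : altLoop l r = r + wsum l := by
  match l with
  | [] => simp [altLoop, wsum]
  | x :: t =>
    rw [altLoop, altLoop_eq_wsum ((x :: t).drop 8), wsum_cons_drop (x :: t)]
    ring
termination_by l.length
decreasing_by simp [List.length_drop]

-- ===== VERDICT (by name: the statement is the Claim_ definition above) =====
theorem minimumPushes_spec : Claim_equal_minimumPushes := by
  intro word _
  simp only [Spec_minimumPushes, minimumPushes, minimumPushes_alt]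
  rw [altLoop_eq_wsum]
  have h := enumFold_eq_wsum'
    (PySem.List.sorted (PySem.Dict.counter word.toList).values (fun x => x) true) 0 0
  simp only [Nat.cast_zero, Nat.zero_add] at h
  rw [h]
  rfl
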